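-- pv_equiv track=rewrite | github.com/invk007/codewars | problems/interview/find_max_sublist.py | find_max_sublist
-- ===== SOURCE A (Python) =====
-- def find_max_sublist(nums1: list[int], nums2: list[int]) -> list[int]:
--     if not nums1 or not nums2:
--         return []
--
--     ans = []
--
--     for i, el1 in enumerate(nums1):
--         for j, el2 in enumerate(nums2):
--             if el1 == el2:
--                 m = i + 1
--                 n = j + 1
--
--                 while m < len(nums1) and n < len(nums2) and nums1[m] == nums2[n]:
--                     m += 1
--                     n += 1
--
--                 if len(nums1[i:m]) > len(ans):
--                     ans = list(nums1[i:m])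
--
--     return ans
-- ===== SOURCE B (Python) =====
-- def find_max_sublist(nums1: list[int], nums2: list[int]) -> list[int]:
--     m = len(nums2)
--     # rows[i][j] = length of the longest common prefix of nums1[i:] and nums2[j:],
--     # built bottom-up in O(len(nums1)*m) instead of re-scanning with a while loop.
--     rows = [[0] * (m + 1)]
--     for x in reversed(nums1):
--         nxt = rows[-1]
--         rows.append([nxt[j + 1] + 1 if x == nums2[j] else 0 for j in range(m)] + [0])
--     rows.reverse()
--     best_i = 0
--     best_len = 0
--     for i in range(len(nums1)):
--         row = rows[i]
--         for j in range(m):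
--             if row[j] > best_len:
--                 best_len = row[j]
--                 best_i = i
--     return nums1[best_i:best_i + best_len]
-- ===== Notes on version B (the rewrite author's own statement) =====
-- stated objective: faster
-- what changed: Replaces A's per-matching-pair while-loop rescan with a dynamic-programming table of suffix-match lengths (dp[i][j] = longest common prefix of nums1[i:] and nums2[j:]) built once back-to-front, then a single scan for the first strictly-longer entry.
import Mathlib
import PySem

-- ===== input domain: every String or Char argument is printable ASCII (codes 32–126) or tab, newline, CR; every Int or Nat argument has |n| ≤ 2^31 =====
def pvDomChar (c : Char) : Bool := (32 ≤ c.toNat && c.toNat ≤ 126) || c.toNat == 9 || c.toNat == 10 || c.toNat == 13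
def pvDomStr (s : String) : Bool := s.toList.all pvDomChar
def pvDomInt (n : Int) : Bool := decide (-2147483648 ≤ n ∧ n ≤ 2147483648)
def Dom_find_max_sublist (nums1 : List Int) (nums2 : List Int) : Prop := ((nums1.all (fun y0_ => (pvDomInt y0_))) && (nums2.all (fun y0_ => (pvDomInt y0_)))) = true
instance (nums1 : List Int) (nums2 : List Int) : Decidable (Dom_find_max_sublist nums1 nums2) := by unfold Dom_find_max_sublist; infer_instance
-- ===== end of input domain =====

-- B replaces A's per-pair while-loop rescans by a suffix-match-length DP table built once (objective: faster).


-- ===== PORT A =====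
-- the inner 'while m < len(nums1) and n < len(nums2) and nums1[m] == nums2[n]: m += 1; n += 1', returning the final m
def pvWhileA (nums1 nums2 : List Int) (m n : Nat) : Nat :=
  if h : m < nums1.length ∧ n < nums2.length ∧ nums1[m]? = nums2[n]? then
    pvWhileA nums1 nums2 (m + 1) (n + 1)
  else m
  termination_by nums1.length - m
  decreasing_by obtain ⟨h1, -, -⟩ := h; omega

def find_max_sublist (nums1 : List Int) (nums2 : List Int) : List Int :=
  if nums1 = [] ∨ nums2 = [] then []
  else
    (PySem.List.enumerate nums1 0).foldl (fun ans p =>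
      (PySem.List.enumerate nums2 0).foldl (fun ans q =>
        if p.2 = q.2 then
          let mEnd := pvWhileA nums1 nums2 (p.1.toNat + 1) (q.1.toNat + 1)
          let sl := PySem.List.slice nums1 (some p.1) (some (mEnd : Int))
          if sl.length > ans.length then sl else ans
        else ans) ans) []

-- ===== PORT B =====
-- one dp row: [nxt[j + 1] + 1 if x == nums2[j] else 0 for j in range(m)] + [0]
def pvRowB (nums2 : List Int) (x : Int) (nxt : List Nat) : List Nat :=
  ((PySem.List.pyRange 0 nums2.length 1).map (fun j =>
      if x = PySem.List.pyGetD nums2 j 0 then PySem.List.pyGetD nxt (j + 1) 0 + 1 else 0)) ++ [0]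

def find_max_sublist_alt (nums1 : List Int) (nums2 : List Int) : List Int :=
  let m := nums2.length
  -- dp rows built back-to-front by appending, then reversed (as in Source B)
  let rows0 := nums1.reverse.foldl
      (fun rows x => rows ++ [pvRowB nums2 x (PySem.List.pyGetD rows (-1) [])])
      [List.replicate (m + 1) 0]
  let rows := rows0.reverse
  let best := (PySem.List.pyRange 0 nums1.length 1).foldl (fun (st : Nat × Nat) i =>
      (PySem.List.pyRange 0 m 1).foldl (fun (st : Nat × Nat) j =>
        if PySem.List.pyGetD (PySem.List.pyGetD rows i []) j 0 > st.2 then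
          (i.toNat, PySem.List.pyGetD (PySem.List.pyGetD rows i []) j 0)
        else st) st) (0, 0)
  PySem.List.slice nums1 (some (best.1 : Int)) (some ((best.1 : Int) + (best.2 : Int)))

-- ===== PRECONDITION & SPEC =====
def Spec_find_max_sublist (nums1 : List Int) (nums2 : List Int) (out : List Int) : Prop := out = find_max_sublist_alt nums1 nums2
instance (nums1 : List Int) (nums2 : List Int) (out : List Int) : Decidable (Spec_find_max_sublist nums1 nums2 out) := by unfold Spec_find_max_sublist; infer_instance

-- ===== CLAIM (what is proved, stated in full; the proofs are below) =====
def Claim_equal_find_max_sublist : Prop := ∀ (nums1 : List Int) (nums2 : List Int), Dom_find_max_sublist nums1 nums2 → Spec_find_max_sublist nums1 nums2 (find_max_sublist nums1 nums2)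

-- ===== LEMMAS AND PROOFS =====

-- length of the common prefix of two lists
def pvExt : List Int → List Int → Nat
  | a :: xs, b :: ys => if a = b then pvExt xs ys + 1 else 0
  | _, _ => 0

theorem pvExt_nil_right (xs : List Int) : pvExt xs [] = 0 := by
  cases xs <;> rfl

theorem pvExt_le_length (xs ys : List Int) : pvExt xs ys ≤ xs.length := by
  induction xs generalizing ys with
  | nil => cases ys <;> simp [pvExt]
  | cons a xs ih =>
    cases ys with
    | nil => simp [pvExt]
    | cons b ys =>
        simp only [pvExt, List.length_cons]
        split_ifs
        · have := ih ys; omega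
        · omega

-- the dp rows, specified structurally
def pvR (nums2 : List Int) : List Int → List (List Nat)
  | [] => [List.replicate (nums2.length + 1) 0]
  | x :: t => pvRowB nums2 x ((pvR nums2 t).headD []) :: pvR nums2 t

theorem pvR_ne_nil (nums2 t : List Int) : pvR nums2 t ≠ [] := by
  cases t <;> simp [pvR]

-- the append loop builds (pvR nums2 nums1).reverse
theorem pvRows_loop (nums2 : List Int) :
    ∀ (r l : List Int),
      r.foldl (fun rows x => rows ++ [pvRowB nums2 x (PySem.List.pyGetD rows (-1) [])])
        ((pvR nums2 l).reverse)
      = (pvR nums2 (r.reverse ++ l)).reverse := by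
  intro r
  induction r with
  | nil => intro l; simp
  | cons x r ih =>
      intro l
      simp only [List.foldl_cons]
      have hstep : (pvR nums2 l).reverse
            ++ [pvRowB nums2 x (PySem.List.pyGetD ((pvR nums2 l).reverse) (-1) [])]
          = (pvR nums2 (x :: l)).reverse := by
        obtain ⟨y, ys, hy⟩ := List.exists_cons_of_ne_nil (pvR_ne_nil nums2 l)
        simp [pvR, hy, List.reverse_cons, PySem.List.pyGetD_neg_one_append_singleton]
      rw [hstep, ih (x :: l)]
      congr 1
      simp

theorem rows_eq (nums1 nums2 : List Int) :
    (nums1.reverse.foldl (fun rows x => rows ++ [pvRowB nums2 x (PySem.List.pyGetD rows (-1) [])])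
        [List.replicate (nums2.length + 1) 0]).reverse = pvR nums2 nums1 := by
  have h := pvRows_loop nums2 nums1.reverse []
  simp only [List.reverse_reverse, List.append_nil] at h
  have h0 : (pvR nums2 ([] : List Int)).reverse = [List.replicate (nums2.length + 1) 0] := by
    simp [pvR]
  rw [h0] at h
  rw [h, List.reverse_reverse]

-- entries of the head row measure common prefixes
theorem pvR_head_getD (nums2 t : List Int) :
    ∀ (j : Nat), ((pvR nums2 t).headD []).getD j 0 = pvExt t (nums2.drop j) := by
  induction t with
  | nil =>
      intro j
      have h0 : pvExt [] (nums2.drop j) = 0 := by cases nums2.drop j <;> rfl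
      rcases Nat.lt_or_ge j (nums2.length + 1) with hj | hj
      · simp [pvR, h0, List.getD_eq_getElem?_getD, hj]
      · have hj' : ¬ (j < nums2.length + 1) := by omega
        simp [pvR, h0, List.getD_eq_getElem?_getD, hj']
  | cons x t ih =>
      intro j
      have hhead : (pvR nums2 (x :: t)).headD [] = pvRowB nums2 x ((pvR nums2 t).headD []) := by
        simp [pvR]
      rw [hhead]
      unfold pvRowB
      rcases Nat.lt_or_ge j nums2.length with hj | hj
      · have hlen : j < ((PySem.List.pyRange 0 (nums2.length : Int) 1).map (fun j =>
            if x = PySem.List.pyGetD nums2 j 0 then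
              PySem.List.pyGetD ((pvR nums2 t).headD []) (j + 1) 0 + 1 else 0)).length := by
          simp [PySem.List.length_pyRange_one]; omega
        rw [List.getD_append _ _ _ j hlen]
        rw [List.getD_eq_getElem?_getD, PySem.List.getElem?_map_pyRange_zero _ _ _ hj]
        simp only [Option.getD_some]
        rw [PySem.List.pyGetD_natCast]
        have hc : ((j : Int) + 1) = (((j + 1 : Nat)) : Int) := by push_cast; ring
        rw [hc, PySem.List.pyGetD_natCast]
        rw [List.getD_eq_getElem nums2 0 hj]
        rw [ih (j + 1)]
        rw [List.drop_eq_getElem_cons hj]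
        simp [pvExt]
      · have hdrop : nums2.drop j = [] := List.drop_eq_nil_of_le hj
        rw [hdrop, pvExt_nil_right]
        have hlen : ((PySem.List.pyRange 0 (nums2.length : Int) 1).map (fun j =>
            if x = PySem.List.pyGetD nums2 j 0 then
              PySem.List.pyGetD ((pvR nums2 t).headD []) (j + 1) 0 + 1 else 0)).length = nums2.length := by
          simp [PySem.List.length_pyRange_one]
        rw [List.getD_eq_getElem?_getD, List.getElem?_append_right (by omega)]
        rw [hlen]
        cases h' : j - nums2.length with
        | zero => simp
        | succ k => simp

-- rows lookup: entry i is the head row for the i-th suffix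
theorem pvR_getD (nums2 t : List Int) :
    ∀ (i : Nat), i ≤ t.length →
      (pvR nums2 t).getD i [] = (pvR nums2 (t.drop i)).headD [] := by
  induction t with
  | nil =>
      intro i hi
      have h0 : i = 0 := by simp at hi; omega
      subst h0
      simp [pvR]
  | cons x t ih =>
      intro i hi
      cases i with
      | zero => simp [pvR]
      | succ i =>
          simp only [pvR, List.getD_cons_succ, List.drop_succ_cons]
          exact ih i (by simpa using hi)

-- combined dp-entry lemma
theorem pvEntry (nums1 nums2 : List Int) (i j : Nat) (hi : i ≤ nums1.length) :
    PySem.List.pyGetD (PySem.List.pyGetD (pvR nums2 nums1) ((i : Nat) : Int) []) ((j : Nat) : Int) 0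
      = pvExt (nums1.drop i) (nums2.drop j) := by
  simp only [PySem.List.pyGetD_natCast]
  rw [pvR_getD nums2 nums1 i hi, pvR_head_getD]

-- the while loop measures the common-prefix length
theorem pvWhileA_eq_aux (nums1 nums2 : List Int) :
    ∀ (k i j : Nat), nums1.length - i ≤ k →
      pvWhileA nums1 nums2 i j = i + pvExt (nums1.drop i) (nums2.drop j) := by
  intro k
  induction k with
  | zero =>
      intro i j hk
      rw [pvWhileA, dif_neg]
      · have hd : nums1.drop i = [] := List.drop_eq_nil_of_le (by omega)
        rw [hd]
        cases nums2.drop j <;> simp [pvExt]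
      · rintro ⟨h1, -, -⟩; omega
  | succ k ih =>
      intro i j hk
      by_cases h : i < nums1.length ∧ j < nums2.length ∧ nums1[i]? = nums2[j]?
      · rw [pvWhileA, dif_pos h]
        obtain ⟨h1, h2, h3⟩ := h
        rw [ih (i + 1) (j + 1) (by omega)]
        rw [List.drop_eq_getElem_cons h1, List.drop_eq_getElem_cons h2]
        have hx : nums1[i] = nums2[j] := by
          simpa [List.getElem?_eq_getElem, h1, h2] using h3
        simp only [pvExt, if_pos hx]
        omega
      · rw [pvWhileA, dif_neg h]
        rcases Nat.lt_or_ge i nums1.length with hi | hi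
        · rcases Nat.lt_or_ge j nums2.length with hj | hj
          · have hne : nums1[i] ≠ nums2[j] := by
              intro he
              exact h ⟨hi, hj, by simp [hi, hj, he]⟩
            rw [List.drop_eq_getElem_cons hi, List.drop_eq_getElem_cons hj]
            simp [pvExt, hne]
          · have hd : nums2.drop j = [] := List.drop_eq_nil_of_le hj
            rw [hd, pvExt_nil_right]
            omega
        · have hd : nums1.drop i = [] := List.drop_eq_nil_of_le hi
          rw [hd]
          cases nums2.drop j <;> simp [pvExt]

theorem pvWhileA_eq (nums1 nums2 : List Int) (i j : Nat) :
    pvWhileA nums1 nums2 i j = i + pvExt (nums1.drop i) (nums2.drop j) :=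
  pvWhileA_eq_aux nums1 nums2 nums1.length i j (by omega)

-- relation-transport along a foldl over the same list
theorem pvFoldl_rel {α β γ : Type} (R : β → γ → Prop) (f : β → α → β) (g : γ → α → γ) :
    ∀ (l : List α) (b : β) (c : γ), R b c →
      (∀ a ∈ l, ∀ b c, R b c → R (f b a) (g c a)) →
      R (l.foldl f b) (l.foldl g c) := by
  intro l
  induction l with
  | nil => intro b c h _; exact h
  | cons a l ih =>
      intro b c h hstep
      exact ih _ _ (hstep a (by simp) b c h)
        (fun a' ha' => hstep a' (by simp [ha']))

-- the scans of A and B agree (no early return on A's side)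
theorem pvKey (nums1 nums2 : List Int) :
    (PySem.List.enumerate nums1 0).foldl (fun ans p =>
      (PySem.List.enumerate nums2 0).foldl (fun ans q =>
        if p.2 = q.2 then
          let mEnd := pvWhileA nums1 nums2 (p.1.toNat + 1) (q.1.toNat + 1)
          let sl := PySem.List.slice nums1 (some p.1) (some (mEnd : Int))
          if sl.length > ans.length then sl else ans
        else ans) ans) []
    = find_max_sublist_alt nums1 nums2 := by
  simp only [find_max_sublist_alt]
  rw [rows_eq nums1 nums2]
  simp only [PySem.List.enumerate_eq_map_pyRange nums1 0,
    PySem.List.enumerate_eq_map_pyRange nums2 0, List.foldl_map, PySem.List.len_eq]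
  rw [PySem.List.slice_natCast_add]
  refine (pvFoldl_rel
      (fun ans (st : Nat × Nat) => ans = List.take st.2 (List.drop st.1 nums1)
        ∧ ans.length = st.2 ∧ st.1 + st.2 ≤ nums1.length)
      _ _ _ _ _ ⟨by simp, by simp, by simp⟩ ?_).1
  intro i hi ans st hR
  obtain ⟨hi0, hin⟩ := PySem.List.mem_pyRange_one.mp hi
  refine pvFoldl_rel
      (fun ans (st : Nat × Nat) => ans = List.take st.2 (List.drop st.1 nums1)
        ∧ ans.length = st.2 ∧ st.1 + st.2 ≤ nums1.length) _ _ _ _ _ hR ?_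
  intro j hj ans' st' hR'
  obtain ⟨hj0, hjm⟩ := PySem.List.mem_pyRange_one.mp hj
  obtain ⟨hA1, hA2, hA3⟩ := hR'
  set iN := i.toNat with hiNdef
  set jN := j.toNat with hjNdef
  have hiI : i = ((iN : Nat) : Int) := by omega
  have hjI : j = ((jN : Nat) : Int) := by omega
  have hiNlt : iN < nums1.length := by omega
  have hjNlt : jN < nums2.length := by omega
  rw [hiI, hjI]
  have hel1 : PySem.List.pyGetD nums1 ((iN : Nat) : Int) 0 = nums1[iN] := by
    rw [PySem.List.pyGetD_natCast]; exact List.getD_eq_getElem nums1 0 hiNlt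
  have hel2 : PySem.List.pyGetD nums2 ((jN : Nat) : Int) 0 = nums2[jN] := by
    rw [PySem.List.pyGetD_natCast]; exact List.getD_eq_getElem nums2 0 hjNlt
  rw [hel1, hel2, pvEntry nums1 nums2 iN jN (le_of_lt hiNlt)]
  set d := pvExt (nums1.drop iN) (nums2.drop jN) with hd
  by_cases heq : nums1[iN] = nums2[jN]
  · have hdcons : d = pvExt (nums1.drop (iN + 1)) (nums2.drop (jN + 1)) + 1 := by
      rw [hd, List.drop_eq_getElem_cons hiNlt, List.drop_eq_getElem_cons hjNlt]
      simp [pvExt, heq]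
    have hmEnd : pvWhileA nums1 nums2 (iN + 1) (jN + 1) = iN + d := by
      rw [pvWhileA_eq]; omega
    have hdle : d ≤ nums1.length - iN := by
      have := pvExt_le_length (nums1.drop iN) (nums2.drop jN)
      simpa [List.length_drop] using this
    have hslice : PySem.List.slice nums1 (some ((iN : Nat) : Int))
        (some ((pvWhileA nums1 nums2 (iN + 1) (jN + 1) : Nat) : Int))
        = List.take d (List.drop iN nums1) := by
      rw [hmEnd]
      have hc : (((iN + d : Nat)) : Int) = ((iN : Nat) : Int) + ((d : Nat) : Int) := by
        push_cast; ring
      rw [hc, PySem.List.slice_natCast_add]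
    have hslen : (List.take d (List.drop iN nums1)).length = d := by
      simp [List.length_take, List.length_drop]; omega
    rw [if_pos heq, hslice, hslen, hA2]
    split_ifs with hgt
    · exact ⟨rfl, hslen, by omega⟩
    · exact ⟨hA1, hA2, hA3⟩
  · have hd0 : d = 0 := by
      rw [hd, List.drop_eq_getElem_cons hiNlt, List.drop_eq_getElem_cons hjNlt]
      simp [pvExt, heq]
    rw [if_neg heq, hd0, if_neg (by omega)]
    exact ⟨hA1, hA2, hA3⟩

-- ===== VERDICT (by name: the statement is the Claim_ definition above) =====
theorem find_max_sublist_spec : Claim_equal_find_max_sublist := by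
  intro nums1 nums2 _
  unfold Spec_find_max_sublist find_max_sublist
  split_ifs with h
  · rcases h with h | h
    · subst h
      rw [← pvKey [] nums2]
      simp [PySem.List.enumerate_nil]
    · subst h
      rw [← pvKey nums1 []]
      simp [PySem.List.enumerate_nil, List.foldl_fixed]
  · exact pvKey nums1 nums2
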